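-- pv_equiv track=rewrite | github.com/guwenbin1991/awsome_python | test/try_and_test.py | get_nth_setted_bit_position
-- ===== SOURCE A (Python) =====
-- from typing import List
--
-- def get_nth_setted_bit_position(k:int, arr:List[int]) -> int:
--     count = 0
--     for i, n in enumerate(arr):
--         if n == 1:
--             count = count + 1
--             if count == k:
--                 return i
--     return -1
-- ===== SOURCE B (Python) =====
-- def get_nth_setted_bit_position(k, arr):
--     positions = [i for i, n in enumerate(arr) if n == 1]
--     if 0 < k <= len(positions):
--         return positions[k - 1]
--     return -1
-- ===== Notes on version B (the rewrite author's own statement) =====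
-- stated objective: simpler
-- what changed: Builds the full list of indices of elements equal to 1 and indexes into it, instead of streaming with a running counter and early return.
import Mathlib
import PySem

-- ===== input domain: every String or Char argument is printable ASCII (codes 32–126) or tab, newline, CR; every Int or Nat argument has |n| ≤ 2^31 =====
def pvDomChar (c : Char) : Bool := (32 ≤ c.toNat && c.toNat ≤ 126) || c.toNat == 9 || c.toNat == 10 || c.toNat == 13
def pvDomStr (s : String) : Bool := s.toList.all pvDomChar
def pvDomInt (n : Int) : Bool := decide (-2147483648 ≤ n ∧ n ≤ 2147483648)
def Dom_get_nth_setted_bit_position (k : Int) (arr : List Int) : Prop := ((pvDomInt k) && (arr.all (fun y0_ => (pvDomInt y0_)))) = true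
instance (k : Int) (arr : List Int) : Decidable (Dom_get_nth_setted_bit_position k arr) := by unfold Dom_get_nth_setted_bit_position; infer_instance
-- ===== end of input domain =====

-- B builds the index table of 1-positions and indexes into it (simpler decomposition); equal to A everywhere.

-- ===== PORT A =====
-- loop of A: count equals-1 hits; return current index when count reaches k
def pvLoopA (arr : List Int) (i : Int) (count : Int) (k : Int) : Int :=
  match arr with
  | [] => -1
  | n :: t =>
    if n = 1 then
      if count + 1 = k then i else pvLoopA t (i + 1) (count + 1) k
    else pvLoopA t (i + 1) count k

def get_nth_setted_bit_position (k : Int) (arr : List Int) : Int :=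
  pvLoopA arr 0 0 k

-- ===== PORT B =====
-- B: list of indices where the element is 1
def pvPositions (arr : List Int) (i : Int) : List Int :=
  match arr with
  | [] => []
  | n :: t => if n = 1 then i :: pvPositions t (i + 1) else pvPositions t (i + 1)

-- B: simpler decomposition — build the index table, then index into it (guard 0 < k ≤ len)
def get_nth_setted_bit_position_alt (k : Int) (arr : List Int) : Int :=
  let positions := pvPositions arr 0
  if 0 < k ∧ k ≤ positions.length then positions.getD (k - 1).toNat (-1) else -1

-- ===== PRECONDITION & SPEC =====
def Spec_get_nth_setted_bit_position (k : Int) (arr : List Int) (out : Int) : Prop := out = get_nth_setted_bit_position_alt k arr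
instance (k : Int) (arr : List Int) (out : Int) : Decidable (Spec_get_nth_setted_bit_position k arr out) := by unfold Spec_get_nth_setted_bit_position; infer_instance

-- ===== CLAIM (what is proved, stated in full; the proofs are below) =====
def Claim_equal_get_nth_setted_bit_position : Prop := ∀ (k : Int) (arr : List Int), Dom_get_nth_setted_bit_position k arr → Spec_get_nth_setted_bit_position k arr (get_nth_setted_bit_position k arr)

-- ===== LEMMAS AND PROOFS =====

-- ===== VERDICT (by name: the statement is the Claim_ definition above) =====
theorem pvLoopA_eq (arr : List Int) : ∀ (i c k : Int),
    pvLoopA arr i c k =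
      (if 0 < k - c ∧ k - c ≤ (pvPositions arr i).length then
        (pvPositions arr i).getD (k - c - 1).toNat (-1) else -1) := by
  induction arr with
  | nil => intro i c k; simp [pvLoopA, pvPositions]
  | cons n t ih =>
    intro i c k
    by_cases hn : n = 1
    · rw [show pvPositions (n :: t) i = i :: pvPositions t (i + 1) from by
        simp [pvPositions, hn]]
      by_cases hk : c + 1 = k
      · rw [show pvLoopA (n :: t) i c k = i from by simp [pvLoopA, hn, hk]]
        rw [if_pos ⟨by omega, by simp; omega⟩]
        rw [show (k - c - 1).toNat = 0 from by omega]
        rfl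
      · rw [show pvLoopA (n :: t) i c k = pvLoopA t (i + 1) (c + 1) k from by
          simp [pvLoopA, hn, hk]]
        rw [ih]
        by_cases hp : 0 < k - (c + 1) ∧ k - (c + 1) ≤ ((pvPositions t (i + 1)).length : Int)
        · rw [if_pos hp, if_pos ⟨by omega, by simp; omega⟩]
          rw [show (k - c - 1).toNat = (k - (c + 1) - 1).toNat + 1 from by omega]
          rfl
        · rw [if_neg hp, if_neg (by simp; omega)]
    · rw [show pvLoopA (n :: t) i c k = pvLoopA t (i + 1) c k from by
        simp [pvLoopA, hn]]
      rw [show pvPositions (n :: t) i = pvPositions t (i + 1) from by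
        simp [pvPositions, hn]]
      exact ih (i + 1) c k

theorem get_nth_setted_bit_position_spec : Claim_equal_get_nth_setted_bit_position := by
  intro k arr _
  show _ = _
  simp only [get_nth_setted_bit_position, get_nth_setted_bit_position_alt, pvLoopA_eq]
  norm_num
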